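-- pv_equiv track=rewrite | github.com/benochi/pylc | jd/largestProducts.py | largestProducts
-- ===== SOURCE A (Python) =====
-- import heapq
--
-- def largestProducts(nums1, nums2, k):
--     maxHeap = []
--     heapq.heapify(maxHeap)
--     res = []
--     for n in nums1:
--         for x in nums2:
--             product = n * x
--             heapq.heappush(maxHeap, (-product, [n,x]))
--
--     while k > 0 and maxHeap:
--         product, values = heapq.heappop(maxHeap)
--         res.append(values)
--         k -= 1
--
--     return res
-- ===== SOURCE B (Python) =====
-- def largestProducts(nums1, nums2, k):
--     items = sorted((-n * x, n, x) for n in nums1 for x in nums2)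
--     return [[n, x] for _, n, x in items[:max(k, 0)]]
-- ===== Notes on version B (the rewrite author's own statement) =====
-- stated objective: simpler
-- what changed: Replaces the priority queue (push all products onto a heap, then pop k times) with one batch sort of the product triples followed by a slice of the first k entries.
import Mathlib
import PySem

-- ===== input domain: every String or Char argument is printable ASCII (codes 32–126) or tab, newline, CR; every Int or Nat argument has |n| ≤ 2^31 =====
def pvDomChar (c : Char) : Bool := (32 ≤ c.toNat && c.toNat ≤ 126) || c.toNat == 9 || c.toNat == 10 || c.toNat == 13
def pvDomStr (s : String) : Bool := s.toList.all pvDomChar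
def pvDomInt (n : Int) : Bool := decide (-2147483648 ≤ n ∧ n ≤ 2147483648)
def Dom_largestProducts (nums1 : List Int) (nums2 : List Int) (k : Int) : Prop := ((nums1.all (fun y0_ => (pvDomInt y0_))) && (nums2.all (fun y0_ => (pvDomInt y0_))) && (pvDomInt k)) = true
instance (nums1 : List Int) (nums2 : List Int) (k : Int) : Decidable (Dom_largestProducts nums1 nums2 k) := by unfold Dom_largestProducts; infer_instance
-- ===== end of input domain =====

-- B replaces A's push-everything-then-pop-k max-heap with one batch sort of the product
-- triples followed by a slice (objective: simpler).

-- ===== PORT A =====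
-- A heap item (-product, [n, x]) is carried as the triple (-product, n, x): the value lists all
-- have length 2, so Python's lexicographic tuple/list comparison of two items is exactly the
-- Lex order on the triples. pvKey is that comparison key.
def pvKey (t : Int × Int × Int) : Lex (Int × Lex (Int × Int)) := toLex (t.1, toLex (t.2.1, t.2.2))

def pvLt (a b : Int × Int × Int) : Bool := decide (pvKey a < pvKey b)

-- heapq.heappush: appends the item (the heap holds the pushed multiset; order is produced at pop)
def pvHeapPush (h : List (Int × Int × Int)) (it : Int × Int × Int) : List (Int × Int × Int) :=
  h ++ [it]

-- heapq.heappop: the least item (first occurrence) and the heap without it — exact model of the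
-- Python heap's observable behaviour: heappop returns the minimum under tuple comparison, and
-- items comparing equal are identical values, so the popped value sequence is the same.
def pvHeapPop : List (Int × Int × Int) → Option ((Int × Int × Int) × List (Int × Int × Int))
  | [] => none
  | x :: xs =>
    match pvHeapPop xs with
    | none => some (x, [])
    | some (m, rest) => if pvLt m x then some (m, x :: rest) else some (x, xs)

-- termination measure for the while loop below (cited by its decreasing_by)
theorem pvHeapPop_length (h : List (Int × Int × Int)) (m : Int × Int × Int)
    (rest : List (Int × Int × Int)) (hp : pvHeapPop h = some (m, rest)) :
    rest.length < h.length := by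
  induction h generalizing m rest with
  | nil => simp [pvHeapPop] at hp
  | cons x xs ih =>
    rw [pvHeapPop] at hp
    rcases hx : pvHeapPop xs with _ | ⟨m', rest'⟩ <;> rw [hx] at hp <;> dsimp only at hp
    · simp only [Option.some.injEq, Prod.mk.injEq] at hp
      rw [← hp.2]
      simp
    · by_cases hlt : pvLt m' x = true
      · rw [if_pos hlt] at hp
        simp only [Option.some.injEq, Prod.mk.injEq] at hp
        have := ih m' rest' hx
        rw [← hp.2]
        simp only [List.length_cons]
        omega
      · rw [if_neg hlt] at hp
        simp only [Option.some.injEq, Prod.mk.injEq] at hp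
        rw [← hp.2]
        simp

-- the while loop: while k > 0 and maxHeap: pop, append values, k -= 1
def pvPopLoop (k : Int) (heap : List (Int × Int × Int)) (res : List (List Int)) :
    List (List Int) :=
  if k > 0 then
    match hp : pvHeapPop heap with
    | none => res
    | some ((_, n, x), rest) => pvPopLoop (k - 1) rest (res ++ [[n, x]])
  else res
termination_by heap.length
decreasing_by exact pvHeapPop_length heap _ _ hp

def largestProducts (nums1 : List Int) (nums2 : List Int) (k : Int) : List (List Int) :=
  let maxHeap := nums1.foldl
    (fun h n => nums2.foldl (fun h x => pvHeapPush h (-(n * x), n, x)) h) []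
  pvPopLoop k maxHeap []

-- ===== PORT B =====
def largestProducts_alt (nums1 : List Int) (nums2 : List Int) (k : Int) : List (List Int) :=
  let items := nums1.flatMap (fun n => nums2.map (fun x => (-(n * x), n, x)))
  let sortedItems := PySem.List.sorted items pvKey false
  (PySem.List.slice sortedItems none (some (max k 0))).map (fun t => [t.2.1, t.2.2])

-- ===== PRECONDITION & SPEC =====
def Spec_largestProducts (nums1 : List Int) (nums2 : List Int) (k : Int) (out : List (List Int)) : Prop := out = largestProducts_alt nums1 nums2 k
instance (nums1 : List Int) (nums2 : List Int) (k : Int) (out : List (List Int)) : Decidable (Spec_largestProducts nums1 nums2 k out) := by unfold Spec_largestProducts; infer_instance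

-- ===== CLAIM (what is proved, stated in full; the proofs are below) =====
def Claim_equal_largestProducts : Prop := ∀ (nums1 : List Int) (nums2 : List Int) (k : Int), Dom_largestProducts nums1 nums2 k → Spec_largestProducts nums1 nums2 k (largestProducts nums1 nums2 k)

-- ===== LEMMAS AND PROOFS =====
theorem pvKey_injective : Function.Injective pvKey := by
  intro a b h
  simp [pvKey, Prod.ext_iff] at h
  exact Prod.ext h.1 (Prod.ext h.2.1 h.2.2)

theorem pvHeapPop_eq_none (h : List (Int × Int × Int)) (hp : pvHeapPop h = none) : h = [] := by
  cases h with
  | nil => rfl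
  | cons x xs =>
    rw [pvHeapPop] at hp
    rcases hx : pvHeapPop xs with _ | ⟨m', rest'⟩ <;> rw [hx] at hp <;> dsimp only at hp
    · exact absurd hp (by simp)
    · by_cases hlt : pvLt m' x = true
      · rw [if_pos hlt] at hp; exact absurd hp (by simp)
      · rw [if_neg hlt] at hp; exact absurd hp (by simp)

theorem pvHeapPop_perm (h : List (Int × Int × Int)) (m : Int × Int × Int)
    (rest : List (Int × Int × Int)) (hp : pvHeapPop h = some (m, rest)) :
    h.Perm (m :: rest) := by
  induction h generalizing m rest with
  | nil => simp [pvHeapPop] at hp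
  | cons x xs ih =>
    rw [pvHeapPop] at hp
    rcases hx : pvHeapPop xs with _ | ⟨m', rest'⟩ <;> rw [hx] at hp <;> dsimp only at hp
    · simp only [Option.some.injEq, Prod.mk.injEq] at hp
      rw [← hp.1, ← hp.2, pvHeapPop_eq_none xs hx]
    · by_cases hlt : pvLt m' x = true
      · rw [if_pos hlt] at hp
        simp only [Option.some.injEq, Prod.mk.injEq] at hp
        rw [← hp.1, ← hp.2]
        exact List.Perm.trans (List.Perm.cons x (ih m' rest' hx)) (List.Perm.swap m' x rest')
      · rw [if_neg hlt] at hp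
        simp only [Option.some.injEq, Prod.mk.injEq] at hp
        rw [← hp.1, ← hp.2]

theorem pvHeapPop_min (h : List (Int × Int × Int)) (m : Int × Int × Int)
    (rest : List (Int × Int × Int)) (hp : pvHeapPop h = some (m, rest)) :
    ∀ y ∈ h, pvKey m ≤ pvKey y := by
  induction h generalizing m rest with
  | nil => simp [pvHeapPop] at hp
  | cons x xs ih =>
    rw [pvHeapPop] at hp
    rcases hx : pvHeapPop xs with _ | ⟨m', rest'⟩ <;> rw [hx] at hp <;> dsimp only at hp
    · simp only [Option.some.injEq, Prod.mk.injEq] at hp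
      rw [pvHeapPop_eq_none xs hx]
      intro y hy
      rw [List.mem_singleton.mp hy, ← hp.1]
    · by_cases hlt : pvLt m' x = true
      · rw [if_pos hlt] at hp
        simp only [Option.some.injEq, Prod.mk.injEq] at hp
        have hmx : pvKey m' < pvKey x := of_decide_eq_true hlt
        intro y hy
        rcases List.mem_cons.mp hy with rfl | hy
        · exact hp.1 ▸ le_of_lt hmx
        · exact hp.1 ▸ ih m' rest' hx y hy
      · rw [if_neg hlt] at hp
        simp only [Option.some.injEq, Prod.mk.injEq] at hp
        have hxm : pvKey x ≤ pvKey m' :=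
          le_of_not_gt (fun hgt => hlt (decide_eq_true hgt))
        intro y hy
        rcases List.mem_cons.mp hy with rfl | hy
        · exact hp.1 ▸ le_refl _
        · exact hp.1 ▸ le_trans hxm (ih m' rest' hx y hy)

theorem pvSorted_pop (h : List (Int × Int × Int)) (m : Int × Int × Int)
    (rest : List (Int × Int × Int)) (hp : pvHeapPop h = some (m, rest)) :
    PySem.List.sorted h pvKey false = m :: PySem.List.sorted rest pvKey false := by
  have hperm : (PySem.List.sorted h pvKey false).Perm
      (m :: PySem.List.sorted rest pvKey false) :=
    List.Perm.trans (PySem.List.sorted_perm h pvKey false)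
      (List.Perm.trans (pvHeapPop_perm h m rest hp)
        (List.Perm.cons m (PySem.List.sorted_perm rest pvKey false).symm))
  refine PySem.List.eq_of_perm_of_pairwise_le_of_injective pvKey pvKey_injective hperm
    (PySem.List.sorted_pairwise h pvKey) ?_
  refine List.pairwise_cons.mpr ⟨?_, PySem.List.sorted_pairwise rest pvKey⟩
  intro y hy
  have hy' : y ∈ h := (pvHeapPop_perm h m rest hp).symm.mem_iff.mp
    (List.mem_cons_of_mem m ((PySem.List.mem_sorted rest pvKey false y).mp hy))
  exact pvHeapPop_min h m rest hp y hy'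

theorem pvPopLoop_eq (heap : List (Int × Int × Int)) (k : Int) (res : List (List Int)) :
    pvPopLoop k heap res =
      res ++ (((PySem.List.sorted heap pvKey false).take k.toNat).map
        (fun t => [t.2.1, t.2.2])) := by
  rw [pvPopLoop]
  by_cases hk : k > 0
  · rw [if_pos hk]
    split
    · rename_i heq
      rw [pvHeapPop_eq_none heap heq]
      simp [PySem.List.sorted]
    · rename_i p n x rest heq
      rw [pvSorted_pop heap (p, n, x) rest heq]
      have hk1 : k.toNat = ((k - 1).toNat) + 1 := by omega
      rw [hk1, List.take_succ_cons, List.map_cons, pvPopLoop_eq rest (k - 1) (res ++ [[n, x]])]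
      simp
  · rw [if_neg hk]
    have h0 : k.toNat = 0 := by omega
    rw [h0]
    simp
termination_by heap.length
decreasing_by exact pvHeapPop_length heap _ _ (by assumption)

theorem pvBuild_eq (nums1 nums2 : List Int) :
    nums1.foldl (fun h n => nums2.foldl (fun h x => pvHeapPush h (-(n * x), n, x)) h) [] =
      nums1.flatMap (fun n => nums2.map (fun x => (-(n * x), n, x))) := by
  have hstep : (fun (h : List (Int × Int × Int)) n =>
      nums2.foldl (fun h x => pvHeapPush h (-(n * x), n, x)) h) =
      fun h n => h ++ nums2.map (fun x => (-(n * x), n, x)) := by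
    funext h n
    exact PySem.List.foldl_append_singleton_eq_map _ nums2 h
  rw [hstep, PySem.List.foldl_append_eq_flatMap]
  simp

-- ===== VERDICT (by name: the statement is the Claim_ definition above) =====
theorem largestProducts_spec : Claim_equal_largestProducts := by
  intro nums1 nums2 k _
  show pvPopLoop k (nums1.foldl
      (fun h n => nums2.foldl (fun h x => pvHeapPush h (-(n * x), n, x)) h) []) [] =
    (PySem.List.slice
      (PySem.List.sorted (nums1.flatMap (fun n => nums2.map (fun x => (-(n * x), n, x))))
        pvKey false)
      none (some (max k 0))).map (fun t => [t.2.1, t.2.2])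
  rw [pvBuild_eq, pvPopLoop_eq, PySem.List.slice_to _ (le_max_right k 0),
    show (max k 0).toNat = k.toNat by omega]
  simp
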